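-- pv_equiv track=rewrite | github.com/pueblak/wordle-autosolver-lite | wordle_autosolver_lite/common.py | _get_master_response
-- ===== SOURCE A (Python) =====
-- RIGHT: str = 'O'
--
-- CLOSE: str = '+'
--
-- WRONG: str = '.'
--
-- def _get_master_response(guess: str, answer: str) -> str:
--     """Gets the expected response on a game of Wordzy Master.
--
--     Args:
--         guess:
--             The word which was guessed by the player
--         answer:
--             A potential answer word to be tested
--
--     Returns:
--         A string represention of the expected response.
--     """
--     if guess == answer:
--         return ''.join([RIGHT for _ in answer])
--     response = ''
--     # get frequency count of each letter in the answer
--     letter_count = dict()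
--     for letter in answer:
--         if letter in letter_count:
--             letter_count[letter] += 1
--         else:
--             letter_count[letter] = 1
--     # first loop counts exact matches
--     for index in range(len(answer)):
--         letter = guess[index]
--         if letter == answer[index]:
--             response += RIGHT
--             letter_count[letter] -= 1
--     # second loop counts non-exact matches
--     for index in range(len(answer)):
--         letter = guess[index]
--         if letter != answer[index]:
--             if letter in letter_count:
--                 if letter_count[letter] > 0:
--                     response += CLOSE
--                     letter_count[letter] -= 1
--     # third loop fills the rest of the response with misses
--     while len(response) < len(answer):
--         response += WRONG
--     return response
-- ===== SOURCE B (Python) =====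
-- RIGHT: str = 'O'
--
-- CLOSE: str = '+'
--
-- WRONG: str = '.'
--
--
-- def _get_master_response(guess: str, answer: str) -> str:
--     """Compute the Wordzy Master response from three counts.
--
--     The response is always grouped (exact matches first, then close
--     matches, then misses), so it is determined by the number of greens
--     and the guess/answer multiset overlap.
--     """
--     n = len(answer)
--     greens = 0
--     for index in range(n):
--         if guess[index] == answer[index]:
--             greens += 1
--     head = guess[:n]
--     overlap = sum(min(head.count(c), answer.count(c)) for c in set(head))
--     yellows = overlap - greens
--     return RIGHT * greens + CLOSE * yellows + WRONG * (n - greens - yellows)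
-- ===== Notes on version B (the rewrite author's own statement) =====
-- stated objective: simpler
-- what changed: Instead of three appending passes over a decrementing letter-count dict, B computes just three counts (greens by one index pass, total multiset overlap via per-letter min of counts, yellows = overlap - greens) and builds the grouped response by string repetition.
import Mathlib
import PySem

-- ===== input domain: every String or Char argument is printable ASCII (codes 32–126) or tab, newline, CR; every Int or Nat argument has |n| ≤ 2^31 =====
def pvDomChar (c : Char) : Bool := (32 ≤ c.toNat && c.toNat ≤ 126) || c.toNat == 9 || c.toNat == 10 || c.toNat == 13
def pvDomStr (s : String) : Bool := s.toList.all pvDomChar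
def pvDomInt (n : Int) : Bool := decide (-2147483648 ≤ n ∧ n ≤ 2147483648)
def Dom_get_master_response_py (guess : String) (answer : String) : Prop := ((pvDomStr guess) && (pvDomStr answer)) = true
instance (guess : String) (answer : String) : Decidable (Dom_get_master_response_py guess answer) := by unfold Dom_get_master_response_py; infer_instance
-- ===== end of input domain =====

-- B computes the grouped response from three counts (greens, overlap, misses) instead of three appending passes over a decrementing dict; equally fast, simpler.


-- ===== PORT A =====
def get_master_response_py (guess : String) (answer : String) : String :=
  if guess == answer then String.ofList (answer.toList.map (fun _ => 'O'))
  else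
    let g := guess.toList
    let a := answer.toList
    -- letter_count: frequency of each letter in the answer
    let letter_count : PySem.Dict Char Int :=
      a.foldl (fun d letter =>
        if d.contains letter then d.insert letter (d.getD letter 0 + 1)
        else d.insert letter 1) PySem.Dict.empty
    -- first loop: exact matches (response, letter_count as one state)
    let st1 :=
      (PySem.List.pyRange 0 (PySem.List.len a) 1).foldl
        (fun (st : List Char × PySem.Dict Char Int) index =>
          let letter := PySem.List.pyGetD g index ' '
          if letter == PySem.List.pyGetD a index ' ' then
            (st.1 ++ ['O'], st.2.modify letter 0 (· - 1))
          else st)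
        ([], letter_count)
    -- second loop: non-exact matches
    let st2 :=
      (PySem.List.pyRange 0 (PySem.List.len a) 1).foldl
        (fun (st : List Char × PySem.Dict Char Int) index =>
          let letter := PySem.List.pyGetD g index ' '
          if letter != PySem.List.pyGetD a index ' ' then
            if st.2.contains letter then
              if st.2.getD letter 0 > 0 then
                (st.1 ++ ['+'], st.2.modify letter 0 (· - 1))
              else st
            else st
          else st)
        st1
    -- while loop: fill the rest with misses
    String.ofList (st2.1 ++ List.replicate (a.length - st2.1.length) '.')

-- ===== PORT B =====
def get_master_response_py_alt (guess : String) (answer : String) : String :=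
  let a := answer.toList
  let gl := guess.toList
  let n := PySem.List.len a
  let greens : Int :=
    (PySem.List.pyRange 0 n 1).foldl
      (fun acc index =>
        if PySem.List.pyGetD gl index ' ' == PySem.List.pyGetD a index ' ' then acc + 1
        else acc) 0
  let head := PySem.List.slice gl none (some n)
  let overlap : Int :=
    ((PySem.Set.ofList head).map
      (fun c => min ((head.count c : Int)) ((a.count c : Int)))).sum
  let yellows := overlap - greens
  String.ofList (List.replicate greens.toNat 'O' ++ List.replicate yellows.toNat '+'
    ++ List.replicate (n - greens - yellows).toNat '.')

-- ===== PRECONDITION & SPEC =====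
-- Pre_ excludes exactly the inputs where A raises IndexError (guess shorter than answer); B raises there too.
def Pre_get_master_response_py (guess : String) (answer : String) : Prop :=
  answer.toList.length ≤ guess.toList.length
instance (guess : String) (answer : String) : Decidable (Pre_get_master_response_py guess answer) := by
  unfold Pre_get_master_response_py; infer_instance

def pvWitness_get_master_response_py : String × String := ("crate", "trace")

def Spec_get_master_response_py (guess : String) (answer : String) (out : String) : Prop := out = get_master_response_py_alt guess answer
instance (guess : String) (answer : String) (out : String) : Decidable (Spec_get_master_response_py guess answer out) := by unfold Spec_get_master_response_py; infer_instance

-- ===== CLAIM (what is proved, stated in full; the proofs are below) =====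
def Claim_equal_get_master_response_py : Prop := ∀ (guess : String) (answer : String), Dom_get_master_response_py guess answer → Pre_get_master_response_py guess answer → Spec_get_master_response_py guess answer (get_master_response_py guess answer)

-- ===== LEMMAS AND PROOFS =====

-- the zipped (guess-letter, answer-letter) pairs, the matched count, the mismatched letters
def pvZip (g a : List Char) : List (Char × Char) := (g.take a.length).zip a
def pvG (l : List (Char × Char)) : Nat := l.countP (fun p => p.1 == p.2)
def pvMg (l : List (Char × Char)) : List Char := (l.filter (fun p => p.1 != p.2)).map Prod.fst
def pvMa (l : List (Char × Char)) : List Char := (l.filter (fun p => p.1 != p.2)).map Prod.snd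
-- greedy yellow count = per-letter min of mismatch count and remaining budget
def pvS (mg : List Char) (R : Char → Nat) : Nat := ∑ c ∈ mg.toFinset, min (mg.count c) (R c)
-- the canonical grouped response
def pvCanon (g a : List Char) : List Char :=
  List.replicate (pvG (pvZip g a)) 'O'
  ++ List.replicate (pvS (pvMg (pvZip g a)) (fun c => (pvMa (pvZip g a)).count c)) '+'
  ++ List.replicate (a.length - (pvG (pvZip g a)
        + pvS (pvMg (pvZip g a)) (fun c => (pvMa (pvZip g a)).count c))) '.'

lemma pv_foldl_range_zip {σ : Type} (g a : List Char) (h : a.length ≤ g.length)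
    (f : σ → Char → Char → σ) (init : σ) :
    (List.range a.length).foldl (fun st i => f st (g.getD i ' ') (a.getD i ' ')) init
    = (pvZip g a).foldl (fun st p => f st p.1 p.2) init := by
  induction a generalizing g init with
  | nil => simp [pvZip]
  | cons x a' ih =>
    cases g with
    | nil => simp at h
    | cons y g' =>
      simp only [List.length_cons, List.range_succ_eq_map, List.foldl_cons, List.foldl_map,
        List.getD_cons_zero, pvZip, List.take_succ_cons, List.zip_cons_cons]
      simpa [List.getD_cons_succ, pvZip] using ih g' (by simpa using h) (f init y x)

lemma pv_foldl_index_zip {σ : Type} (g a : List Char) (h : a.length ≤ g.length)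
    (f : σ → Char → Char → σ) (init : σ) :
    (PySem.List.pyRange 0 (PySem.List.len a) 1).foldl
      (fun st i => f st (PySem.List.pyGetD g i ' ') (PySem.List.pyGetD a i ' ')) init
    = (pvZip g a).foldl (fun st p => f st p.1 p.2) init := by
  rw [PySem.List.len_eq, PySem.List.pyRange_zero_nat, List.foldl_map]
  simpa [PySem.List.pyGetD_natCast] using pv_foldl_range_zip g a h f init

lemma pv_counter_getD (a : List Char) (c : Char) :
    (a.foldl (fun d letter =>
        if d.contains letter then d.insert letter (d.getD letter 0 + 1)
        else d.insert letter 1) (PySem.Dict.empty : PySem.Dict Char Int)).getD c 0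
      = (a.count c : Int) := by
  have hfun : ∀ (d : PySem.Dict Char Int) (x : Char),
      (if d.contains x then d.insert x (d.getD x 0 + 1) else d.insert x 1)
        = d.insert x (d.getD x 0 + 1) := by
    intro d x
    by_cases hx : d.contains x
    · simp [hx]
    · simp only [Bool.not_eq_true] at hx
      rw [PySem.Dict.getD_of_not_contains (h := hx)]
      simp [hx]
  calc (a.foldl (fun d letter =>
        if d.contains letter then d.insert letter (d.getD letter 0 + 1)
        else d.insert letter 1) (PySem.Dict.empty : PySem.Dict Char Int)).getD c 0
      = (a.foldl (fun d x => d.insert x (d.getD x 0 + 1)) (PySem.Dict.empty : PySem.Dict Char Int)).getD c 0 := by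
        exact congrArg (fun d => PySem.Dict.getD d c 0) (PySem.List.foldl_congr_mem a _ _ PySem.Dict.empty (fun acc x _ => hfun acc x))
    _ = (a.count c : Int) := by
        rw [PySem.Dict.getD_foldl_insert_add_one]
        simp [PySem.Dict.getD_empty]

lemma pv_green_fold (l : List (Char × Char)) (resp : List Char) (d : PySem.Dict Char Int) :
    (l.foldl (fun (st : List Char × PySem.Dict Char Int) p =>
        if p.1 == p.2 then (st.1 ++ ['O'], st.2.modify p.1 0 (· - 1)) else st) (resp, d)).1
      = resp ++ List.replicate (pvG l) 'O'
    ∧ ∀ c, (l.foldl (fun (st : List Char × PySem.Dict Char Int) p =>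
        if p.1 == p.2 then (st.1 ++ ['O'], st.2.modify p.1 0 (· - 1)) else st) (resp, d)).2.getD c 0
      = d.getD c 0 - (l.count (c, c) : Int) := by
  induction l generalizing resp d with
  | nil => simp [pvG]
  | cons p l' ih =>
    by_cases hp : p.1 = p.2
    · obtain ⟨x, y⟩ := p
      simp only at hp
      subst hp
      simp only [List.foldl_cons, beq_self_eq_true, if_pos]
      obtain ⟨ih1, ih2⟩ := ih (resp ++ ['O']) (d.modify x 0 (· - 1))
      constructor
      · rw [ih1]
        simp [pvG, List.countP_cons, List.append_assoc, List.replicate_succ]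
      · intro c
        rw [ih2 c, PySem.Dict.getD_modify]
        by_cases hc : c = x
        · subst hc
          simp [List.count_cons]
          omega
        · have : ((c, c) = (x, x)) = False := by simp [hc]
          simp [hc, Ne.symm hc, List.count_cons, this]
    · simp only [List.foldl_cons]
      rw [if_neg (by simpa using hp)]
      obtain ⟨ih1, ih2⟩ := ih resp d
      refine ⟨by rw [ih1]; simp [pvG, List.countP_cons, hp], fun c => ?_⟩
      rw [ih2 c]
      have : ((p = (c, c)) = False) := by
        simp only [eq_iff_iff, iff_false]
        rintro rfl; exact hp rfl
      simp [List.count_cons, this]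

lemma pvS_cons_zero (c₀ : Char) (mg : List Char) (R : Char → Nat) (h : R c₀ = 0) :
    pvS (c₀ :: mg) R = pvS mg R := by
  unfold pvS
  rw [List.toFinset_cons]
  by_cases hm : c₀ ∈ mg.toFinset
  · rw [Finset.insert_eq_self.mpr hm]
    refine Finset.sum_congr rfl (fun c hc => ?_)
    by_cases hcc : c = c₀
    · subst hcc; simp [h]
    · simp [List.count_cons, Ne.symm hcc]
  · rw [Finset.sum_insert hm]
    have h0 : mg.count c₀ = 0 := by simpa using List.count_eq_zero.mpr (by simpa using hm)
    simp only [List.count_cons_self, h0, h, Nat.min_zero, Nat.zero_add]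
    refine Finset.sum_congr rfl (fun c hc => ?_)
    have hne : c ≠ c₀ := by rintro rfl; exact hm hc
    simp [List.count_cons, Ne.symm hne]

lemma pvS_cons_pos (c₀ : Char) (mg : List Char) (R : Char → Nat) (h : 0 < R c₀) :
    pvS (c₀ :: mg) R = 1 + pvS mg (fun c => if c = c₀ then R c₀ - 1 else R c) := by
  unfold pvS
  rw [List.toFinset_cons]
  by_cases hm : c₀ ∈ mg.toFinset
  · rw [Finset.insert_eq_self.mpr hm]
    rw [← Finset.add_sum_erase _ _ hm, ← Finset.add_sum_erase _ _ hm]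
    have hterm : min ((c₀ :: mg).count c₀) (R c₀) = 1 + min (mg.count c₀) (R c₀ - 1) := by
      simp only [List.count_cons_self]
      omega
    rw [hterm]
    simp only [if_pos rfl]
    have : ∀ c ∈ mg.toFinset.erase c₀,
        min ((c₀ :: mg).count c) (R c) = min (mg.count c) (if c = c₀ then R c₀ - 1 else R c) := by
      intro c hc
      have hne : c ≠ c₀ := Finset.ne_of_mem_erase hc
      simp [List.count_cons, Ne.symm hne, hne]
    rw [Finset.sum_congr rfl this]
    simp only [if_pos rfl, eq_self_iff_true, if_true]
    omega
  · rw [Finset.sum_insert hm]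
    have h0 : mg.count c₀ = 0 := List.count_eq_zero.mpr (by simpa using hm)
    have hterm : min ((c₀ :: mg).count c₀) (R c₀) = 1 := by
      simp only [List.count_cons_self, h0]
      omega
    rw [hterm]
    congr 1
    refine Finset.sum_congr rfl (fun c hc => ?_)
    have hne : c ≠ c₀ := by rintro rfl; exact hm hc
    simp [List.count_cons, Ne.symm hne, hne]

lemma pv_yellow_fold (mg : List Char) (resp : List Char) (d : PySem.Dict Char Int)
    (R : Char → Nat) (hR : ∀ c, d.getD c 0 = (R c : Int)) :
    (mg.foldl (fun (st : List Char × PySem.Dict Char Int) letter =>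
        if st.2.contains letter then
          if st.2.getD letter 0 > 0 then (st.1 ++ ['+'], st.2.modify letter 0 (· - 1))
          else st
        else st) (resp, d)).1
      = resp ++ List.replicate (pvS mg R) '+' := by
  induction mg generalizing resp d R with
  | nil => simp [pvS]
  | cons c₀ mg' ih =>
    by_cases hpos : 0 < R c₀
    · have hct : d.contains c₀ = true := by
        by_contra hct
        simp only [Bool.not_eq_true] at hct
        have := PySem.Dict.getD_of_not_contains (d := d) (k := c₀) (d0 := (0 : Int)) hct
        rw [hR c₀] at this
        omega
      have hgt : d.getD c₀ 0 > 0 := by rw [hR c₀]; exact_mod_cast hpos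
      simp only [List.foldl_cons, hct, if_pos, hgt, if_true]
      rw [ih (resp ++ ['+']) _ (fun c => if c = c₀ then R c₀ - 1 else R c) ?_]
      · rw [pvS_cons_pos c₀ mg' R hpos, Nat.add_comm]
        simp [List.replicate_succ, List.append_assoc]
      · intro c
        rw [PySem.Dict.getD_modify]
        by_cases hc : c = c₀
        · subst hc
          simp only [hR c, if_true, eq_self_iff_true]
          omega
        · simp [hc, hR c]
    · have h0 : R c₀ = 0 := by omega
      have hgd : d.getD c₀ 0 = 0 := by rw [hR c₀, h0]; simp
      have hstep : (if d.contains c₀ then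
          if d.getD c₀ 0 > 0 then (resp ++ ['+'], d.modify c₀ 0 (· - 1))
          else ((resp, d) : List Char × PySem.Dict Char Int)
        else (resp, d)) = (resp, d) := by
        rw [hgd]
        simp
      simp only [List.foldl_cons, hstep]
      rw [ih resp d R hR, pvS_cons_zero c₀ mg' R h0]

lemma pv_count_split (l : List (Char × Char)) (c : Char) :
    (l.map Prod.fst).count c = l.count (c, c) + (pvMg l).count c
    ∧ (l.map Prod.snd).count c = l.count (c, c) + (pvMa l).count c := by
  induction l with
  | nil => simp [pvMg, pvMa]
  | cons p l ih =>
    obtain ⟨ih1, ih2⟩ := ih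
    obtain ⟨x, y⟩ := p
    simp only [pvMg, pvMa, List.map_cons, List.filter_cons, List.count_cons] at *
    by_cases hp : x = y
    · subst hp
      by_cases hc : x = c <;>
        simp [hc, List.count_cons, ih1, ih2, Prod.ext_iff] <;> omega
    · have h1 : ((x, y) = (c, c)) = False := by
        simp only [eq_iff_iff, iff_false, Prod.mk.injEq, not_and]
        rintro rfl rfl; exact hp rfl
      simp [hp, List.count_cons, ih1, ih2, h1]
      constructor <;> omega

lemma pv_green_sum (l : List (Char × Char)) :
    pvG l = ∑ c ∈ (l.map Prod.fst).toFinset, l.count (c, c) := by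
  classical
  set lg : List Char := (l.filter (fun p => p.1 == p.2)).map Prod.fst with hlg
  have hcount : ∀ c, lg.count c = l.count (c, c) := by
    intro c
    rw [hlg, List.count_eq_countP, List.countP_map, List.countP_filter, List.count_eq_countP]
    refine List.countP_congr (fun p _ => ?_)
    obtain ⟨x, y⟩ := p
    simp only [Function.comp_apply, beq_iff_eq, Bool.and_eq_true, Prod.mk.injEq, decide_eq_true_eq]
    by_cases h1 : x = c <;> by_cases h2 : y = c
    · subst h1; subst h2; simp
    · subst h1; simp [h2, Ne.symm h2]
    · simp [h1]
    · simp [h1]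
  have hlen : pvG l = lg.length := by
    rw [hlg, List.length_map, ← List.countP_eq_length_filter, pvG]
  have hsub : lg.toFinset ⊆ (l.map Prod.fst).toFinset := by
    intro c hc
    simp only [List.mem_toFinset, hlg, List.mem_map] at *
    obtain ⟨p, hp, rfl⟩ := hc
    exact ⟨p, List.mem_of_mem_filter hp, rfl⟩
  have hvanish : ∀ c ∈ (l.map Prod.fst).toFinset, c ∉ lg.toFinset → lg.count c = 0 := by
    intro c _ hc
    exact List.count_eq_zero.mpr (by simpa using hc)
  rw [hlen, ← List.sum_toFinset_count_eq_length lg, Finset.sum_subset hsub hvanish]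
  exact Finset.sum_congr rfl (fun c _ => hcount c)

lemma pv_overlap_eq (l : List (Char × Char)) :
    ∑ c ∈ (l.map Prod.fst).toFinset,
        min ((l.map Prod.fst).count c) ((l.map Prod.snd).count c)
      = pvG l + pvS (pvMg l) (fun c => (pvMa l).count c) := by
  classical
  have hmin : ∀ c, min ((l.map Prod.fst).count c) ((l.map Prod.snd).count c)
      = l.count (c, c) + min ((pvMg l).count c) ((pvMa l).count c) := by
    intro c
    obtain ⟨h1, h2⟩ := pv_count_split l c
    rw [h1, h2]
    omega
  rw [Finset.sum_congr rfl (fun c _ => hmin c), Finset.sum_add_distrib, ← pv_green_sum]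
  congr 1
  have hsub : (pvMg l).toFinset ⊆ (l.map Prod.fst).toFinset := by
    intro c hc
    simp only [List.mem_toFinset, pvMg, List.mem_map] at *
    obtain ⟨p, hp, rfl⟩ := hc
    exact ⟨p, List.mem_of_mem_filter hp, rfl⟩
  have hvanish : ∀ c ∈ (l.map Prod.fst).toFinset, c ∉ (pvMg l).toFinset →
      min ((pvMg l).count c) ((pvMa l).count c) = 0 := by
    intro c _ hc
    have : (pvMg l).count c = 0 := List.count_eq_zero.mpr (by simpa using hc)
    omega
  rw [← Finset.sum_subset hsub hvanish, pvS]

lemma pv_zip_self (a : List Char) :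
    pvG (a.zip a) = a.length ∧ pvMg (a.zip a) = [] := by
  induction a with
  | nil => simp [pvG, pvMg]
  | cons x a ih => simp [pvG, pvMg, List.countP_cons] at *; omega

lemma pv_sum_ofList_map (xs : List Char) (f : Char → Int) :
    ((PySem.Set.ofList xs).map f).sum = ∑ c ∈ xs.toFinset, f c := by
  have hperm : (PySem.Set.ofList xs).Perm xs.dedup := by
    refine (List.perm_ext_iff_of_nodup (PySem.Set.nodup_ofList xs) (List.nodup_dedup xs)).mpr ?_
    intro x
    simp [PySem.Set.mem_ofList, List.mem_dedup]
  rw [List.Perm.sum_eq (List.Perm.map f hperm)]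
  rfl

-- canonical form of B
lemma pv_alt_eq (guess answer : String) (h : answer.toList.length ≤ guess.toList.length) :
    get_master_response_py_alt guess answer
      = String.ofList (pvCanon guess.toList answer.toList) := by
  simp only [get_master_response_py_alt]
  set a := answer.toList with ha
  set gl := guess.toList with hgl
  set l := pvZip gl a with hl
  set G := pvG l with hG
  set Y := pvS (pvMg l) (fun c => (pvMa l).count c) with hY
  have htake : (gl.take a.length).length = a.length := by
    rw [List.length_take]
    omega
  have hfst : l.map Prod.fst = gl.take a.length := by
    rw [hl, pvZip, List.map_fst_zip (by omega)]
  have hsnd : l.map Prod.snd = a := by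
    rw [hl, pvZip, List.map_snd_zip (by omega)]
  have hgr : (PySem.List.pyRange 0 (PySem.List.len a) 1).foldl
      (fun (acc : Int) index =>
        if PySem.List.pyGetD gl index ' ' == PySem.List.pyGetD a index ' ' then acc + 1
        else acc) 0
      = (G : Int) := by
    rw [pv_foldl_index_zip gl a h (fun acc x y => if x == y then acc + 1 else acc) 0]
    rw [show (List.foldl (fun (st : Int) (p : Char × Char) => if (p.1 == p.2) = true then st + 1 else st) 0 (pvZip gl a))
        = 0 + ((pvZip gl a).countP (fun p => p.1 == p.2) : Int)
      from PySem.List.foldl_if_add_one (fun p : Char × Char => p.1 == p.2) (pvZip gl a) 0]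
    simp only [hG, pvG, Nat.zero_add, Int.zero_add, hl]
  have hhead : PySem.List.slice gl none (some (PySem.List.len a)) = gl.take a.length := by
    rw [PySem.List.len_eq, PySem.List.slice_to_natCast]
  have hov : ((PySem.Set.ofList (PySem.List.slice gl none (some (PySem.List.len a)))).map
      (fun c => min (((PySem.List.slice gl none (some (PySem.List.len a))).count c : Int))
        ((a.count c : Int)))).sum = ((G + Y : Nat) : Int) := by
    rw [hhead, pv_sum_ofList_map]
    have : ∀ c ∈ (gl.take a.length).toFinset,
        min (((gl.take a.length).count c : Int)) ((a.count c : Int))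
          = (((min ((l.map Prod.fst).count c) ((l.map Prod.snd).count c) : Nat)) : Int) := by
      intro c _
      rw [hfst, hsnd]
      push_cast
      rfl
    rw [Finset.sum_congr rfl this, ← Nat.cast_sum, ← hfst]
    rw [pv_overlap_eq l]
  rw [hgr, hov]
  have hyell : ((G + Y : Nat) : Int) - (G : Int) = (Y : Int) := by push_cast; ring
  rw [hyell]
  have h1 : ((G : Int)).toNat = G := Int.toNat_natCast G
  have h2 : ((Y : Int)).toNat = Y := Int.toNat_natCast Y
  have h3 : (PySem.List.len a - (G : Int) - (Y : Int)).toNat = a.length - (G + Y) := by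
    rw [PySem.List.len_eq]
    have : ((a.length : Int)) - (G : Int) - (Y : Int) = ((a.length : Int)) - ((G + Y : Nat) : Int) := by
      push_cast; ring
    rw [this, Int.toNat_sub]
  rw [h1, h2, h3]
  rfl

-- canonical form of A off the equal branch
lemma pv_a_eq (guess answer : String) (h : answer.toList.length ≤ guess.toList.length)
    (hne : guess ≠ answer) :
    get_master_response_py guess answer
      = String.ofList (pvCanon guess.toList answer.toList) := by
  simp only [get_master_response_py]
  rw [if_neg (by simpa using hne)]
  set a := answer.toList with ha
  set gl := guess.toList with hgl
  set l := pvZip gl a with hl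
  set d0 := a.foldl (fun d letter =>
      if d.contains letter then d.insert letter (d.getD letter 0 + 1)
      else d.insert letter 1) (PySem.Dict.empty : PySem.Dict Char Int) with hd0
  have hd0getD : ∀ c, d0.getD c 0 = (a.count c : Int) := fun c => pv_counter_getD a c
  have h1 : (PySem.List.pyRange 0 (PySem.List.len a) 1).foldl
      (fun (st : List Char × PySem.Dict Char Int) index =>
        if PySem.List.pyGetD gl index ' ' == PySem.List.pyGetD a index ' ' then
          (st.1 ++ ['O'], st.2.modify (PySem.List.pyGetD gl index ' ') 0 (· - 1))
        else st) ([], d0)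
      = l.foldl (fun st p =>
          if p.1 == p.2 then (st.1 ++ ['O'], st.2.modify p.1 0 (· - 1)) else st) ([], d0) :=
    pv_foldl_index_zip gl a h
      (fun st x y => if x == y then (st.1 ++ ['O'], st.2.modify x 0 (· - 1)) else st) ([], d0)
  rw [h1]
  set st1 := l.foldl (fun st p =>
      if p.1 == p.2 then (st.1 ++ ['O'], st.2.modify p.1 0 (· - 1)) else st) ([], d0) with hst1
  obtain ⟨gf1, gf2⟩ := pv_green_fold l [] d0
  rw [← hst1] at gf1 gf2
  have hsnd : l.map Prod.snd = a := by
    rw [hl, pvZip, List.map_snd_zip (by rw [List.length_take]; omega)]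
  have hR : ∀ c, st1.2.getD c 0 = (((pvMa l).count c : Nat) : Int) := by
    intro c
    rw [gf2 c, hd0getD c]
    have := (pv_count_split l c).2
    rw [hsnd] at this
    omega
  have h2 : (PySem.List.pyRange 0 (PySem.List.len a) 1).foldl
      (fun (st : List Char × PySem.Dict Char Int) index =>
        if PySem.List.pyGetD gl index ' ' != PySem.List.pyGetD a index ' ' then
          if st.2.contains (PySem.List.pyGetD gl index ' ') then
            if st.2.getD (PySem.List.pyGetD gl index ' ') 0 > 0 then
              (st.1 ++ ['+'], st.2.modify (PySem.List.pyGetD gl index ' ') 0 (· - 1))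
            else st
          else st
        else st) st1
      = l.foldl (fun st p =>
          if p.1 != p.2 then
            if st.2.contains p.1 then
              if st.2.getD p.1 0 > 0 then (st.1 ++ ['+'], st.2.modify p.1 0 (· - 1))
              else st
            else st
          else st) st1 :=
    pv_foldl_index_zip gl a h
      (fun st x y => if x != y then
          if st.2.contains x then
            if st.2.getD x 0 > 0 then (st.1 ++ ['+'], st.2.modify x 0 (· - 1)) else st
          else st
        else st) st1
  rw [h2]
  have h3 : l.foldl (fun st p =>
        if p.1 != p.2 then
          if st.2.contains p.1 then
            if st.2.getD p.1 0 > 0 then (st.1 ++ ['+'], st.2.modify p.1 0 (· - 1))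
            else st
          else st
        else st) st1
      = (pvMg l).foldl (fun st letter =>
          if st.2.contains letter then
            if st.2.getD letter 0 > 0 then (st.1 ++ ['+'], st.2.modify letter 0 (· - 1))
            else st
          else st) st1 := by
    rw [pvMg, List.foldl_map]
    exact PySem.List.foldl_if_eq_foldl_filter (fun p : Char × Char => p.1 != p.2)
      (fun (st : List Char × PySem.Dict Char Int) (p : Char × Char) =>
        if st.2.contains p.1 then
          if st.2.getD p.1 0 > 0 then (st.1 ++ ['+'], st.2.modify p.1 0 (· - 1))
          else st
        else st) l st1
  rw [h3]
  have h4 : ((pvMg l).foldl (fun st letter =>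
      if st.2.contains letter then
        if st.2.getD letter 0 > 0 then (st.1 ++ ['+'], st.2.modify letter 0 (· - 1))
        else st
      else st) st1).1
      = st1.1 ++ List.replicate (pvS (pvMg l) (fun c => (pvMa l).count c)) '+' :=
    pv_yellow_fold (pvMg l) st1.1 st1.2 (fun c => (pvMa l).count c) hR
  rw [h4, gf1]
  simp only [List.nil_append, pvCanon, ← hl, List.append_assoc, List.length_append,
    List.length_replicate]

-- ===== VERDICT (by name: the statement is the Claim_ definition above) =====
theorem get_master_response_py_spec : Claim_equal_get_master_response_py := by
  intro guess answer _ hpre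
  unfold Spec_get_master_response_py
  by_cases hne : guess = answer
  · subst hne
    rw [pv_alt_eq guess guess le_rfl]
    unfold get_master_response_py
    rw [if_pos (by simp)]
    have hz := pv_zip_self guess.toList
    have hzip : pvZip guess.toList guess.toList = guess.toList.zip guess.toList := by
      rw [pvZip, List.take_length]
    have hS : pvS (pvMg (pvZip guess.toList guess.toList))
        (fun c => (pvMa (pvZip guess.toList guess.toList)).count c) = 0 := by
      rw [hzip, hz.2]
      simp [pvS]
    rw [pvCanon, hS, hzip, hz.1]
    simp
  · rw [pv_a_eq guess answer hpre hne, pv_alt_eq guess answer hpre]
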